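-- pv_equiv track=rewrite | github.com/thealper2/codewars-solutions | 7-kyu/how_many_urinals_are_free.py | get_free_urinals
-- ===== SOURCE A (Python) =====
-- def get_free_urinals(urinals):
--     urinals = list(urinals)
--     x = len(urinals)
--     count = 0
--
--     for i in range(x - 1):
--         if urinals[i] == "1" and urinals[i + 1] == "1":
--             return -1
--
--     for i in range(x):
--         if urinals[i] == "0":
--             if ((i == 0) or (urinals[i - 1] == "0")) and (
--                 (i == x - 1) or (urinals[i + 1] == "0")
--             ):
--                 urinals[i] = "1"
--                 count += 1
--
--     return count
-- ===== SOURCE B (Python) =====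
-- def get_free_urinals(urinals):
--     s = list(urinals)
--     if any(a == "1" and b == "1" for a, b in zip(s, s[1:])):
--         return -1
--     total = 0
--     n = len(s)
--     i = 0
--     while i < n:
--         if s[i] != "0":
--             i += 1
--             continue
--         j = i
--         while j < n and s[j] == "0":
--             j += 1
--         blocked = (i > 0) + (j < n)
--         total += (j - i + 1 - blocked) // 2
--         i = j
--     return total
-- ===== Notes on version B (the rewrite author's own statement) =====
-- stated objective: alternative
-- what changed: Replaces A's cell-by-cell greedy simulation with in-place list mutation by a run decomposition: split the sequence into maximal runs of free cells and add one closed-form count (L+1-blocked)//2 per run, where blocked counts occupied neighbours at the run's ends.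
import Mathlib
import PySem

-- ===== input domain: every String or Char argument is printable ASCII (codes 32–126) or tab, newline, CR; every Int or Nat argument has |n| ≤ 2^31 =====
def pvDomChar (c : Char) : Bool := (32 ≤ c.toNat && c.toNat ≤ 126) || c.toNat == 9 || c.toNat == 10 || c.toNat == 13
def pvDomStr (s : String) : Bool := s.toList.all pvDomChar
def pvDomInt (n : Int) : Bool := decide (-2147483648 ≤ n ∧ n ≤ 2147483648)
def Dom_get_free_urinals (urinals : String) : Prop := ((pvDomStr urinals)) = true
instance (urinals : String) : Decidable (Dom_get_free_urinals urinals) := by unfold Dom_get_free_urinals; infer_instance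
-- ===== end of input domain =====

-- B replaces A's cell-by-cell greedy simulation (mutating the list) by a run decomposition:
-- one closed-form count per maximal run of free cells; same O(n) cost, different algorithm (objective: alternative).

-- ===== PORT A =====
-- A's second loop body, over the mutable list + counter state (x = fixed total length)
def pvStep (x : Nat) (s : List Char × Int) (i : Nat) : List Char × Int :=
  if s.1.getD i ' ' = '0' ∧ (i = 0 ∨ s.1.getD (i - 1) ' ' = '0') ∧
      (i = x - 1 ∨ s.1.getD (i + 1) ' ' = '0') then
    (s.1.set i '1', s.2 + 1)
  else s

def get_free_urinals (urinals : String) : Int :=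
  let l := urinals.toList
  let x := l.length
  -- first loop: early 'return -1' on any adjacent pair of '1's
  if (List.range (x - 1)).any (fun i => l.getD i ' ' == '1' && l.getD (i + 1) ' ' == '1') then -1
  else ((List.range x).foldl (pvStep x) (l, 0)).2

-- ===== PORT B =====
-- Source B's adjacency check: any(a == "1" and b == "1" for a, b in zip(s, s[1:]))
def pvAdj (l : List Char) : Bool := (l.zip l.tail).any (fun p => p.1 == '1' && p.2 == '1')

-- Source B's while loop: consume one maximal run of '0' (or one non-'0' cell) per step
def pvSegs : List Char → Bool → Int
  | [], _ => 0
  | c :: rest, leftOpen =>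
    if c = '0' then
      PySem.Int.floordiv ((1 + ((rest.takeWhile fun d => d = '0').length : Int)) + 1
          - (if leftOpen then 0 else 1)
          - (if (rest.dropWhile fun d => d = '0') = [] then 0 else 1)) 2
        + pvSegs (rest.dropWhile fun d => d = '0') false
    else pvSegs rest false
termination_by l _ => l.length
decreasing_by
  · exact Nat.lt_succ_of_le (List.length_dropWhile_le _ _)
  · simp

def get_free_urinals_alt (urinals : String) : Int :=
  let l := urinals.toList
  if pvAdj l then -1 else pvSegs l true

-- ===== PRECONDITION & SPEC =====
def Spec_get_free_urinals (urinals : String) (out : Int) : Prop := out = get_free_urinals_alt urinals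
instance (urinals : String) (out : Int) : Decidable (Spec_get_free_urinals urinals out) := by unfold Spec_get_free_urinals; infer_instance

-- ===== CLAIM (what is proved, stated in full; the proofs are below) =====
def Claim_equal_get_free_urinals : Prop := ∀ (urinals : String), Dom_get_free_urinals urinals → Spec_get_free_urinals urinals (get_free_urinals urinals)

-- ===== LEMMAS AND PROOFS =====

-- a recursive characterisation of A's greedy loop: b = "the cell to the left is free or absent"
def pvG : Bool → List Char → Int
  | _, [] => 0
  | b, c :: rest =>
    if c = '0' ∧ b = true ∧ (rest = [] ∨ rest.head? = some '0') then 1 + pvG false rest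
    else pvG (c == '0') rest

-- whether the processed prefix p ends in a free cell (or is empty)
def pvOpen (p : List Char) : Bool :=
  match p.getLast? with
  | none => true
  | some c => c == '0'

theorem pvAdj_eq (l : List Char) :
    (List.range (l.length - 1)).any
        (fun i => l.getD i ' ' == '1' && l.getD (i + 1) ' ' == '1') = pvAdj l := by
  induction l with
  | nil => simp [pvAdj]
  | cons c rest ih =>
    cases rest with
    | nil => simp [pvAdj]
    | cons d r =>
      simp only [List.length_cons, Nat.add_sub_cancel, List.range_succ_eq_map, List.any_cons,
        List.any_map, pvAdj, List.tail_cons, List.zip_cons_cons] at *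
      simp only [Function.comp_def, List.getD_cons_succ, List.getD_cons_zero]
      rw [← ih]
      rfl

theorem pvGetD_append_len (p m : List Char) (k : Nat) :
    (p ++ m).getD (p.length + k) ' ' = m.getD k ' ' := by
  simp [List.getD, List.getElem?_append_right (Nat.le_add_right p.length k)]

theorem pvSet_append_len (p m : List Char) (a : Char) :
    (p ++ m).set p.length a = p ++ m.set 0 a := by
  induction p with
  | nil => simp
  | cons q qs ih => simp [ih]

theorem pvCond1 (p : List Char) (m : List Char) :
    (p.length = 0 ∨ (p ++ m).getD (p.length - 1) ' ' = '0') ↔ pvOpen p = true := by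
  rcases List.eq_nil_or_concat p with h | ⟨q, a, h⟩
  · subst h; simp [pvOpen]
  · subst h
    have hlen : (q.concat a).length = q.length + 1 := by simp
    have hget : ((q.concat a) ++ m).getD ((q.concat a).length - 1) ' ' = a := by
      rw [hlen]
      simp only [Nat.add_sub_cancel, List.concat_eq_append, List.append_assoc]
      simpa using pvGetD_append_len q ([a] ++ m) 0
    rw [hget, hlen]
    simp [pvOpen, List.concat_eq_append]

theorem pvLoop_eq (t : List Char) : ∀ (p : List Char) (c0 : Int) (x : Nat),
    x = p.length + t.length →
    ((List.range' p.length t.length).foldl (pvStep x) (p ++ t, c0)).2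
      = c0 + pvG (pvOpen p) t := by
  induction t with
  | nil => intro p c0 x _; simp [pvG]
  | cons c t' ih =>
    intro p c0 x hx
    rw [List.length_cons, List.range'_succ, List.foldl_cons]
    have hc : (p ++ c :: t').getD p.length ' ' = c := by
      simpa using pvGetD_append_len p (c :: t') 0
    have hcond1 := pvCond1 p (c :: t')
    have hcond2 : (p.length = x - 1 ∨ (p ++ c :: t').getD (p.length + 1) ' ' = '0')
        ↔ (t' = [] ∨ t'.head? = some '0') := by
      cases t' with
      | nil => subst hx; simp
      | cons d r =>
        have hget : (p ++ c :: d :: r).getD (p.length + 1) ' ' = d := by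
          simpa using pvGetD_append_len p (c :: d :: r) 1
        rw [hget]
        simp only [List.length_cons] at hx
        constructor
        · rintro (h | h)
          · omega
          · right; simp [h]
        · rintro (h | h)
          · simp at h
          · right; simp at h; simp [h]
    by_cases hcnd : c = '0' ∧ pvOpen p = true ∧ (t' = [] ∨ t'.head? = some '0')
    · have hset : (p ++ c :: t').set p.length '1' = (p ++ ['1']) ++ t' := by
        rw [pvSet_append_len]; simp
      have hstep : pvStep x (p ++ c :: t', c0) p.length = ((p ++ ['1']) ++ t', c0 + 1) := by
        unfold pvStep
        rw [if_pos]
        · simp [hset]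
        · exact ⟨hc.trans hcnd.1, hcond1.mpr hcnd.2.1, hcond2.mpr hcnd.2.2⟩
      have hlen1 : p.length + 1 = (p ++ ['1']).length := by simp
      rw [hstep, hlen1, ih (p ++ ['1']) (c0 + 1) x (by simp at hx ⊢; omega)]
      have hopen : pvOpen (p ++ ['1']) = false := by
        simp [pvOpen]
      rw [hopen]
      rw [show pvG (pvOpen p) (c :: t') = 1 + pvG false t' by
        rw [pvG]; rw [if_pos hcnd]]
      ring
    · have hstep : pvStep x (p ++ c :: t', c0) p.length = ((p ++ [c]) ++ t', c0) := by
        unfold pvStep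
        rw [if_neg]
        · simp
        · intro hh
          obtain ⟨h1, h2, h3⟩ := hh
          exact hcnd ⟨hc.symm.trans h1, hcond1.mp h2, hcond2.mp h3⟩
      have hlen1 : p.length + 1 = (p ++ [c]).length := by simp
      rw [hstep, hlen1, ih (p ++ [c]) c0 x (by simp at hx ⊢; omega)]
      have hopen : pvOpen (p ++ [c]) = (c == '0') := by
        simp [pvOpen]
      rw [hopen]
      rw [show pvG (pvOpen p) (c :: t') = pvG (c == '0') t' by
        rw [pvG]; rw [if_neg hcnd]]

theorem pvG_indep (b : Bool) (c : Char) (rest : List Char) (h : ¬ c = '0') :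
    pvG b (c :: rest) = pvG false rest := by
  have hb : (c == '0') = false := by simp [h]
  simp [pvG, h, hb]

theorem pvRun (L : Nat) : ∀ (rest : List Char) (b : Bool), rest.head? ≠ some '0' →
    pvG b (List.replicate (L + 1) '0' ++ rest)
      = PySem.Int.floordiv ((1 + (L : Int)) + 1 - (if b then 0 else 1)
          - (if rest = [] then 0 else 1)) 2 + pvG false rest := by
  induction L with
  | zero =>
    intro rest b h
    cases rest with
    | nil =>
      cases b <;> simp [pvG, PySem.Int.floordiv]
    | cons d r =>
      have hd : ¬ d = '0' := by simpa using h
      cases b <;> simp [pvG, hd]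
  | succ n ih =>
    intro rest b h
    have hrepl : List.replicate (n + 1 + 1) '0' ++ rest
        = '0' :: (List.replicate (n + 1) '0' ++ rest) := by
      simp [List.replicate_succ]
    have hhead : (List.replicate (n + 1) '0' ++ rest).head? = some '0' := by
      simp [List.replicate_succ]
    rw [hrepl]
    cases b with
    | true =>
      rw [show pvG true ('0' :: (List.replicate (n + 1) '0' ++ rest))
          = 1 + pvG false (List.replicate (n + 1) '0' ++ rest) by
        simp [pvG, hhead]]
      rw [ih rest false h]
      rw [PySem.Int.floordiv_eq_ediv_of_pos (by norm_num : (0:Int) < 2),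
        PySem.Int.floordiv_eq_ediv_of_pos (by norm_num : (0:Int) < 2)]
      simp only [if_true, if_false, Bool.false_eq_true]
      push_cast
      split_ifs <;> omega
    | false =>
      rw [show pvG false ('0' :: (List.replicate (n + 1) '0' ++ rest))
          = pvG true (List.replicate (n + 1) '0' ++ rest) by
        simp [pvG]]
      rw [ih rest true h]
      rw [PySem.Int.floordiv_eq_ediv_of_pos (by norm_num : (0:Int) < 2),
        PySem.Int.floordiv_eq_ediv_of_pos (by norm_num : (0:Int) < 2)]
      simp only [if_true, if_false, Bool.false_eq_true]
      push_cast
      split_ifs <;> omega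

theorem pvDropWhile_head (p : Char → Bool) (l : List Char) :
    ∀ {d : Char} {r : List Char}, l.dropWhile p = d :: r → p d = false := by
  induction l with
  | nil => intro d r h; simp at h
  | cons c cs ih =>
    intro d r h
    by_cases hp : p c = true
    · rw [List.dropWhile_cons_of_pos hp] at h; exact ih h
    · rw [List.dropWhile_cons_of_neg hp] at h
      injection h with h1 _
      subst h1
      simpa using hp

theorem pvSegs_eq : ∀ (n : Nat) (l : List Char), l.length = n → ∀ (b : Bool), pvSegs l b = pvG b l := by
  intro n
  induction n using Nat.strong_induction_on with
  | _ n ihn =>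
    intro l hl b
    cases l with
    | nil => simp [pvSegs, pvG]
    | cons c rest =>
      by_cases hc : c = '0'
      · subst hc
        set T := rest.takeWhile (fun d => d = '0') with hTdef
        set R := rest.dropWhile (fun d => d = '0') with hRdef
        have hTR : T ++ R = rest := List.takeWhile_append_dropWhile
        have hT : T = List.replicate T.length '0' := by
          apply List.eq_replicate_of_mem
          intro x hx
          simpa using List.mem_takeWhile_imp hx
        have hR : R.head? ≠ some '0' := by
          cases hR0 : R with
          | nil => simp
          | cons d r =>
            have hd := pvDropWhile_head (fun d => decide (d = '0')) rest (hRdef ▸ hR0)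
            simp at hd
            simp [hd]
        have hsplit : ('0' :: rest) = List.replicate (T.length + 1) '0' ++ R := by
          rw [List.replicate_succ, List.cons_append, ← hT, hTR]
        have hRlen : R.length < n := by
          have h1 : R.length ≤ rest.length := List.length_dropWhile_le _ _
          simp at hl
          omega
        rw [show pvSegs ('0' :: rest) b
            = PySem.Int.floordiv ((1 + (T.length : Int)) + 1
                - (if b then 0 else 1) - (if R = [] then 0 else 1)) 2
              + pvSegs R false by
          rw [pvSegs]; rw [if_pos rfl]]
        rw [ihn R.length hRlen R rfl false]
        rw [hsplit, pvRun T.length R b hR]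
      · rw [show pvSegs (c :: rest) b = pvSegs rest false by rw [pvSegs]; rw [if_neg hc]]
        rw [ihn rest.length (by simp at hl; omega) rest rfl false]
        rw [pvG_indep b c rest hc]

-- ===== VERDICT (by name: the statement is the Claim_ definition above) =====
theorem get_free_urinals_spec : Claim_equal_get_free_urinals := by
  intro u _
  unfold Spec_get_free_urinals get_free_urinals get_free_urinals_alt
  simp only [pvAdj_eq]
  split
  · rfl
  · have h := pvLoop_eq u.toList [] 0 u.toList.length (by simp)
    simpa [List.range_eq_range', pvOpen, pvSegs_eq u.toList.length u.toList rfl] using h
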